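-- pv_equiv track=rewrite | github.com/ringyee/micropython-esp32 | device/dtl645.py | sub33
-- ===== SOURCE A (Python) =====
-- def sub33(buf):
--     rb = []
--     for i in range(len(buf)):
--         rb.append(0)
--     for i in range(len(buf)):
--         if buf[i] >= 0x33:
--             rb[len(buf) - i - 1] = buf[i] - 0x33
--         else:
--             rb[len(buf) - i - 1] = buf[i] + 0xCD
--     return rb
-- ===== SOURCE B (Python) =====
-- def sub33(buf):
--     # Drain a LIFO stack: pop bytes off the end of a copy of buf and append
--     # each transformed byte, so the output comes out reversed with no index
--     # arithmetic and no preallocated array.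
--     stack = list(buf)
--     out = []
--     while stack:
--         b = stack.pop()
--         out.append(b - 0x33 if b >= 0x33 else b + 0xCD)
--     return out
-- ===== Notes on version B (the rewrite author's own statement) =====
-- stated objective: alternative
-- what changed: Replaces A's two index loops (zero preallocation then mirror-index scatter writes) with an explicit LIFO stack drain: pop each byte off the end of a copy of buf and append its transform, so the reversal comes from the stack discipline with no index arithmetic or preallocated array.
import Mathlib
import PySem

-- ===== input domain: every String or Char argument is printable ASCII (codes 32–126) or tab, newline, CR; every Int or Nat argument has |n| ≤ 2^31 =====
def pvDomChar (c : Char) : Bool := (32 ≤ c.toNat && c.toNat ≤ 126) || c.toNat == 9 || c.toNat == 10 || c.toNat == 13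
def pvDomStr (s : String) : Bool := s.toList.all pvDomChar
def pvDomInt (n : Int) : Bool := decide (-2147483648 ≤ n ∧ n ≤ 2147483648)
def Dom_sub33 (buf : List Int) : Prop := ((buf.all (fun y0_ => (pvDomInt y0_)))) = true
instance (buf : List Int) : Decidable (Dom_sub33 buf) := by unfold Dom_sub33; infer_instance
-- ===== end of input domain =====

-- B replaces A's zero-preallocation and mirror-index scatter loops with an explicit
-- LIFO stack drain (pop from the end, append the transform); objective: alternative.

-- ===== PORT A =====
def sub33 (buf : List Int) : List Int :=
  -- rb = []; for i in range(len(buf)): rb.append(0)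
  let rb := (List.range buf.length).foldl (fun rb _ => rb ++ [(0 : Int)]) []
  -- for i in range(len(buf)): rb[len(buf)-i-1] = buf[i]-0x33 / buf[i]+0xCD
  (List.range buf.length).foldl
    (fun rb i =>
      let b := buf.getD i 0        -- buf[i]; i < len(buf), so in range
      rb.set (buf.length - i - 1) (if b ≥ 0x33 then b - 0x33 else b + 0xCD))
    rb

-- ===== PORT B =====
-- while stack: b = stack.pop(); out.append(...)
def sub33_altLoop : List Int → List Int → List Int
  | [], out => out
  | s :: tail, out =>
      let b := (s :: tail).getLastD 0          -- stack.pop(): the last element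
      sub33_altLoop (s :: tail).dropLast (out ++ [if b ≥ 0x33 then b - 0x33 else b + 0xCD])
  termination_by stack _ => stack.length
  decreasing_by simp

def sub33_alt (buf : List Int) : List Int := sub33_altLoop buf []

-- ===== PRECONDITION & SPEC =====
def Spec_sub33 (buf : List Int) (out : List Int) : Prop := out = sub33_alt buf
instance (buf : List Int) (out : List Int) : Decidable (Spec_sub33 buf out) := by unfold Spec_sub33; infer_instance

-- ===== CLAIM =====
def Claim_equal_sub33 : Prop := ∀ (buf : List Int), Dom_sub33 buf → Spec_sub33 buf (sub33 buf)

-- ===== LEMMAS AND PROOFS =====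

-- The first loop builds a list of n zeros.
theorem sub33_zeros (n : Nat) (l : List Int) :
    (List.range n).foldl (fun rb _ => rb ++ [(0 : Int)]) l = l ++ List.replicate n 0 := by
  induction n generalizing l with
  | zero => simp
  | succ k ih => simp [List.range_succ, ih, List.replicate_succ']

-- Scatter-loop invariant: after k iterations the suffix of length k holds the
-- reversed transformed prefix of buf.
theorem sub33_scatter (buf : List Int) (f : Int → Int) :
    ∀ k, k ≤ buf.length → ∀ l : List Int, l.length = buf.length →
    (List.range k).foldl (fun rb i => rb.set (buf.length - i - 1) (f (buf.getD i 0))) l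
      = l.take (buf.length - k) ++ ((buf.take k).map f).reverse := by
  intro k
  induction k with
  | zero => intro _ l hl; simp [hl]
  | succ k ih =>
      intro hk l hl
      rw [List.range_succ, List.foldl_append]
      rw [ih (by omega) l hl]
      simp only [List.foldl_cons, List.foldl_nil]
      have hbk : buf.getD k 0 = buf[k]'(by omega) := by
        rw [List.getD_eq_getElem?_getD, List.getElem?_eq_getElem (by omega)]; rfl
      have htk : buf.take (k+1) = buf.take k ++ [buf[k]'(by omega)] := by
        rw [List.take_add_one, List.getElem?_eq_getElem (by omega)]; rfl
      rw [hbk, htk]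
      have hlt : (l.take (buf.length - k)).length = buf.length - k := by
        simp [hl]
      rw [List.set_append, hlt, if_pos (by omega)]
      have h1 : buf.length - (k+1) = (buf.length - k) - 1 := by omega
      have hset : (l.take (buf.length - k)).set (buf.length - k - 1) (f (buf[k]'(by omega)))
          = l.take (buf.length - (k+1)) ++ [f (buf[k]'(by omega))] := by
        rw [List.set_eq_take_append_cons_drop, if_pos (by omega)]
        rw [List.take_take, List.drop_take]
        have h2 : buf.length - k - 1 + 1 = buf.length - k := by omega
        rw [h2]
        simp only [Nat.sub_self, List.take_zero]
        rw [Nat.min_eq_left (by omega), h1]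
      rw [hset]
      rw [List.map_append, List.reverse_append]
      simp

-- Draining the stack appends the reversed transformed stack to out.
theorem sub33_altLoop_eq (stack : List Int) : ∀ out : List Int,
    sub33_altLoop stack out
      = out ++ (stack.map (fun b => if b ≥ 0x33 then b - 0x33 else b + 0xCD)).reverse := by
  induction stack using List.reverseRecOn with
  | nil => intro out; simp [sub33_altLoop]
  | append_singleton init b ih =>
      intro out
      cases hinit : init ++ [b] with
      | nil => exact absurd hinit (by simp)
      | cons y ys =>
          rw [sub33_altLoop]
          rw [← hinit]
          rw [List.dropLast_concat, List.getLastD_concat, ih]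
          simp

-- B's stack drain computes the reversed transformed list.
theorem sub33_alt_eq (buf : List Int) :
    sub33_alt buf = (buf.map (fun b => if b ≥ 0x33 then b - 0x33 else b + 0xCD)).reverse := by
  simp [sub33_alt, sub33_altLoop_eq]

theorem sub33_eq (buf : List Int) : sub33 buf = sub33_alt buf := by
  simp only [sub33]
  rw [sub33_zeros, sub33_alt_eq]
  have h := sub33_scatter buf (fun b => if b ≥ 51 then b - 51 else b + 205)
      buf.length (le_refl _) ([] ++ List.replicate buf.length 0) (by simp)
  exact h.trans (by simp)

-- ===== VERDICT =====
theorem sub33_spec : Claim_equal_sub33 := by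
  intro buf _
  unfold Spec_sub33
  exact sub33_eq buf
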